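-- pv_equiv track=rewrite | github.com/cirosantilli/project-euler-solvers | solvers/224.py | solve
-- ===== SOURCE A (Python) =====
-- def solve(limit: int = 75_000_000) -> int:
--     # Root solution
--     stack = [(2, 2, 3)]
--     cnt = 0
--     lim = limit
--
--     while stack:
--         a, b, c = stack.pop()
--         p = a + b + c
--         if p > lim:
--             continue
--
--         cnt += 1
--
--         # Children via the three transformations:
--         # M1 * (a,b,c)
--         x = a - 2 * b + 2 * c
--         y = 2 * a - b + 2 * c
--         z = 2 * a - 2 * b + 3 * c
--         if x + y + z <= lim:
--             stack.append((x, y, z))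
--
--         # M2 * (a,b,c)
--         # For a == b, this branch duplicates another path near the root; skip it.
--         if a != b:
--             x = -a + 2 * b + 2 * c
--             y = -2 * a + b + 2 * c
--             z = -2 * a + 2 * b + 3 * c
--             if x + y + z <= lim:
--                 stack.append((x, y, z))
--
--         # M3 * (a,b,c)
--         x = 2 * a + b + 2 * c
--         y = a + 2 * b + 2 * c
--         z = 2 * a + 2 * b + 3 * c
--         if x + y + z <= lim:
--             stack.append((x, y, z))
--
--     return cnt
-- ===== SOURCE B (Python) =====
-- def solve(limit: int = 75_000_000) -> int:
--     # Recursive chain walk. The subtree count is invariant under swapping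
--     # (a, b) because M2 = swap . M1 . swap, M3 commutes with swap and the
--     # perimeter cutoff and the a != b guard are swap-invariant.  So count
--     # walks the M1-chain iteratively, and for the M2 child counts the
--     # mirrored subtree swap(M2(a,b,c)) = M1(b,a,c) instead, whose own
--     # M1-chain is again walked by the loop.  Recursion is only on these
--     # mirrored children and on M3 children, so the depth stays logarithmic.
--     def count(a, b, c):
--         total = 0
--         while a + b + c <= limit:
--             total += 1
--             if a != b:
--                 # mirrored M2 subtree: swap(M2(a,b,c)) = M1(b,a,c)
--                 total += count(-2 * a + b + 2 * c, -a + 2 * b + 2 * c, -2 * a + 2 * b + 3 * c)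
--             total += count(2 * a + b + 2 * c, a + 2 * b + 2 * c, 2 * a + 2 * b + 3 * c)
--             a, b, c = a - 2 * b + 2 * c, 2 * a - b + 2 * c, 2 * a - 2 * b + 3 * c
--         return total
--
--     return count(2, 2, 3)
-- ===== Notes on version B (the rewrite author's own statement) =====
-- stated objective: alternative
-- what changed: Replaced the explicit-stack DFS (pop, count, push pruned children) by a recursive chain walk that exploits the mirror symmetry count(a,b,c)=count(b,a,c) (since M2 = swap.M1.swap): each call iterates the whole M1-chain with a loop, recursing only on the mirrored M2 subtree (= M1 of the swapped triple) and the M3 child, summing subtree sizes bottom-up with logarithmic recursion depth and no stack; the fused chain loop removes the per-node stack push/pop traffic.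
import Mathlib
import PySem

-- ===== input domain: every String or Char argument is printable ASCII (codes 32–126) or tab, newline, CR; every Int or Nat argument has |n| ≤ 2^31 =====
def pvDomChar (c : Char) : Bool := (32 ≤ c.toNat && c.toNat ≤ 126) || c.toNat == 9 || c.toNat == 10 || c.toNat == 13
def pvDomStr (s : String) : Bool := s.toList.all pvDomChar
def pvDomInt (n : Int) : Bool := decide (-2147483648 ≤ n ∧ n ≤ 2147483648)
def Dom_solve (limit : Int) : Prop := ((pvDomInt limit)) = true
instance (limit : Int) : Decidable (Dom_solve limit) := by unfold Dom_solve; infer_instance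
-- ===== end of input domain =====

-- B replaces A's explicit-stack DFS by a recursive chain walk using the mirror
-- symmetry of the triangle tree (M2 = swap ∘ M1 ∘ swap): each call loops over the
-- M1-chain and recurses only on mirrored M2 subtrees and M3 children (same asymptotic
-- cost; the fused chain loop avoids per-node stack traffic). Both ports carry a proof
-- argument (triangle-shape invariant) used only for termination.

-- shape invariant of every node of the triangle tree, used for termination of both ports
def pvInv (a b c : Int) : Prop := 0 < a ∧ 0 < b ∧ a ≤ c ∧ b ≤ c

def pvInvAll (stack : List (Int × Int × Int)) : Prop := ∀ t ∈ stack, pvInv t.1 t.2.1 t.2.2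

def pvMeas (lim a b c : Int) : Nat := 4 ^ ((lim + 1 - (a + b + c)).toNat)

def pvStackMeas (lim : Int) (stack : List (Int × Int × Int)) : Nat :=
  (stack.map fun t => pvMeas lim t.1 t.2.1 t.2.2).sum

def pvPushIf (cond : Prop) [Decidable cond] (x : Int × Int × Int)
    (s : List (Int × Int × Int)) : List (Int × Int × Int) :=
  if cond then x :: s else s

theorem pvMeas_pos (lim a b c : Int) : 1 ≤ pvMeas lim a b c :=
  Nat.one_le_pow _ _ (by norm_num)

-- omega facts proved over atomic variables (keeps the proof terms small)
theorem pvToNatLt (L p q : Int) (hlt : p < q) (hp : ¬ L < p) :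
    (L + 1 - q).toNat < (L + 1 - p).toNat := by omega

theorem pvToNatStep (L p q : Int) (hlt : p < q) (hp : p ≤ L) :
    (L + 1 - q).toNat + 1 ≤ (L + 1 - p).toNat := by omega

theorem pvChainBound (m0 m1 m2 m3 r s1 s2 s3 : Nat)
    (k1 : m1 * 4 ≤ m0) (k2 : m2 * 4 ≤ m0) (k3 : m3 * 4 ≤ m0) (k0 : 1 ≤ m0)
    (t1 : s1 ≤ m1 + r) (t2 : s2 ≤ m2 + s1) (t3 : s3 ≤ m3 + s2) : s3 < m0 + r := by omega

theorem pvMeas_child_le (lim a b c x y z : Int) (hlt : a + b + c < x + y + z)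
    (hp : a + b + c ≤ lim) : pvMeas lim x y z * 4 ≤ pvMeas lim a b c := by
  unfold pvMeas
  have h1 := pvToNatStep lim (a + b + c) (x + y + z) hlt hp
  calc 4 ^ (lim + 1 - (x + y + z)).toNat * 4 = 4 ^ ((lim + 1 - (x + y + z)).toNat + 1) := by
        rw [pow_succ]
    _ ≤ 4 ^ (lim + 1 - (a + b + c)).toNat := Nat.pow_le_pow_right (by norm_num) h1

theorem pvMeas_cons (lim : Int) (x : Int × Int × Int) (s : List (Int × Int × Int)) :
    pvStackMeas lim (x :: s) = pvMeas lim x.1 x.2.1 x.2.2 + pvStackMeas lim s := rfl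

theorem pvMeas_pushIf (lim : Int) (cond : Prop) [Decidable cond] (x : Int × Int × Int)
    (s : List (Int × Int × Int)) :
    pvStackMeas lim (pvPushIf cond x s) ≤ pvMeas lim x.1 x.2.1 x.2.2 + pvStackMeas lim s := by
  unfold pvPushIf
  split_ifs
  · exact Nat.le_of_eq (pvMeas_cons lim x s)
  · exact Nat.le_add_left _ _

theorem pvMeas_drop (lim : Int) (x : Int × Int × Int) (s : List (Int × Int × Int)) :
    pvStackMeas lim s < pvStackMeas lim (x :: s) := by
  rw [pvMeas_cons]
  have := pvMeas_pos lim x.1 x.2.1 x.2.2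
  omega

theorem pvPushIf_mem (cond : Prop) [Decidable cond] (x : Int × Int × Int)
    (s : List (Int × Int × Int)) (t : Int × Int × Int) (ht : t ∈ pvPushIf cond x s) :
    t = x ∨ t ∈ s := by
  unfold pvPushIf at ht
  split_ifs at ht
  · exact List.mem_cons.mp ht
  · exact Or.inr ht

theorem pvInv_M1 (a b c : Int) (h : pvInv a b c) :
    pvInv (a - 2*b + 2*c) (2*a - b + 2*c) (2*a - 2*b + 3*c) := by
  unfold pvInv at *; omega

theorem pvInv_M2 (a b c : Int) (h : pvInv a b c) :
    pvInv (-a + 2*b + 2*c) (-2*a + b + 2*c) (-2*a + 2*b + 3*c) := by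
  unfold pvInv at *; omega

theorem pvInv_M3 (a b c : Int) (h : pvInv a b c) :
    pvInv (2*a + b + 2*c) (a + 2*b + 2*c) (2*a + 2*b + 3*c) := by
  unfold pvInv at *; omega

-- mirrored M2 child: swap(M2(a,b,c)) = M1(b,a,c)
theorem pvInv_M2s (a b c : Int) (h : pvInv a b c) :
    pvInv (-2*a + b + 2*c) (-a + 2*b + 2*c) (-2*a + 2*b + 3*c) := by
  unfold pvInv at *; omega

theorem pvPerim_M1 (a b c : Int) (h : pvInv a b c) :
    a + b + c < (a - 2*b + 2*c) + (2*a - b + 2*c) + (2*a - 2*b + 3*c) := by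
  unfold pvInv at h; omega

theorem pvPerim_M2 (a b c : Int) (h : pvInv a b c) :
    a + b + c < (-a + 2*b + 2*c) + (-2*a + b + 2*c) + (-2*a + 2*b + 3*c) := by
  unfold pvInv at h; omega

theorem pvPerim_M2s (a b c : Int) (h : pvInv a b c) :
    a + b + c < (-2*a + b + 2*c) + (-a + 2*b + 2*c) + (-2*a + 2*b + 3*c) := by
  unfold pvInv at h; omega

theorem pvPerim_M3 (a b c : Int) (h : pvInv a b c) :
    a + b + c < (2*a + b + 2*c) + (a + 2*b + 2*c) + (2*a + 2*b + 3*c) := by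
  unfold pvInv at h; omega

-- ===== PORT A =====

-- the three conditional pushes of A's loop body (top of stack = list head)
def pvStepA (lim a b c : Int) (rest : List (Int × Int × Int)) : List (Int × Int × Int) :=
  pvPushIf ((2*a + b + 2*c) + (a + 2*b + 2*c) + (2*a + 2*b + 3*c) ≤ lim)
    (2*a + b + 2*c, a + 2*b + 2*c, 2*a + 2*b + 3*c)
    (pvPushIf (a ≠ b ∧ (-a + 2*b + 2*c) + (-2*a + b + 2*c) + (-2*a + 2*b + 3*c) ≤ lim)
      (-a + 2*b + 2*c, -2*a + b + 2*c, -2*a + 2*b + 3*c)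
      (pvPushIf ((a - 2*b + 2*c) + (2*a - b + 2*c) + (2*a - 2*b + 3*c) ≤ lim)
        (a - 2*b + 2*c, 2*a - b + 2*c, 2*a - 2*b + 3*c) rest))

theorem pvStepA_inv (lim a b c : Int) (rest : List (Int × Int × Int))
    (hh : pvInv a b c) (hr : pvInvAll rest) : pvInvAll (pvStepA lim a b c rest) := by
  intro t ht
  rcases pvPushIf_mem _ _ _ t ht with rfl | ht
  · exact pvInv_M3 a b c hh
  rcases pvPushIf_mem _ _ _ t ht with rfl | ht
  · exact pvInv_M2 a b c hh
  rcases pvPushIf_mem _ _ _ t ht with rfl | ht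
  · exact pvInv_M1 a b c hh
  · exact hr t ht

theorem pvStepA_meas (lim a b c : Int) (rest : List (Int × Int × Int))
    (hh : pvInv a b c) (hp : a + b + c ≤ lim) :
    pvStackMeas lim (pvStepA lim a b c rest) < pvMeas lim a b c + pvStackMeas lim rest := by
  have k1 := pvMeas_child_le lim a b c _ _ _ (pvPerim_M1 a b c hh) hp
  have k2 := pvMeas_child_le lim a b c _ _ _ (pvPerim_M2 a b c hh) hp
  have k3 := pvMeas_child_le lim a b c _ _ _ (pvPerim_M3 a b c hh) hp
  have k0 := pvMeas_pos lim a b c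
  have t3 := pvMeas_pushIf lim
    ((2*a + b + 2*c) + (a + 2*b + 2*c) + (2*a + 2*b + 3*c) ≤ lim)
    (2*a + b + 2*c, a + 2*b + 2*c, 2*a + 2*b + 3*c)
    (pvPushIf (a ≠ b ∧ (-a + 2*b + 2*c) + (-2*a + b + 2*c) + (-2*a + 2*b + 3*c) ≤ lim)
      (-a + 2*b + 2*c, -2*a + b + 2*c, -2*a + 2*b + 3*c)
      (pvPushIf ((a - 2*b + 2*c) + (2*a - b + 2*c) + (2*a - 2*b + 3*c) ≤ lim)
        (a - 2*b + 2*c, 2*a - b + 2*c, 2*a - 2*b + 3*c) rest))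
  have t2 := pvMeas_pushIf lim
    (a ≠ b ∧ (-a + 2*b + 2*c) + (-2*a + b + 2*c) + (-2*a + 2*b + 3*c) ≤ lim)
    (-a + 2*b + 2*c, -2*a + b + 2*c, -2*a + 2*b + 3*c)
    (pvPushIf ((a - 2*b + 2*c) + (2*a - b + 2*c) + (2*a - 2*b + 3*c) ≤ lim)
      (a - 2*b + 2*c, 2*a - b + 2*c, 2*a - 2*b + 3*c) rest)
  have t1 := pvMeas_pushIf lim
    ((a - 2*b + 2*c) + (2*a - b + 2*c) + (2*a - 2*b + 3*c) ≤ lim)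
    (a - 2*b + 2*c, 2*a - b + 2*c, 2*a - 2*b + 3*c) rest
  dsimp only at t1 t2 t3
  unfold pvStepA
  exact pvChainBound _ _ _ _ _ _ _ _ k1 k2 k3 k0 t1 t2 t3

def solveLoop (lim : Int) (stack : List (Int × Int × Int)) (cnt : Int)
    (h : pvInvAll stack) : Int :=
  match stack, h with
  | [], _ => cnt
  | (a, b, c) :: rest, h =>
    if hgt : a + b + c > lim then
      solveLoop lim rest cnt (fun t ht => h t (List.mem_cons_of_mem _ ht))
    else
      solveLoop lim (pvStepA lim a b c rest) (cnt + 1)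
        (pvStepA_inv lim a b c rest (h (a, b, c) (by simp))
          (fun t ht => h t (List.mem_cons_of_mem _ ht)))
termination_by pvStackMeas lim stack
decreasing_by
  · exact pvMeas_drop lim (a, b, c) rest
  · exact pvStepA_meas lim a b c rest (h (a, b, c) (by simp)) (Int.not_lt.mp hgt)

theorem pvRootInvA : pvInvAll [(2, 2, 3)] := by
  intro t ht
  simp only [List.mem_singleton] at ht
  subst ht
  exact ⟨by norm_num, by norm_num, by norm_num, by norm_num⟩

def solve (limit : Int) : Int :=
  solveLoop limit [(2, 2, 3)] 0 pvRootInvA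

-- ===== PORT B =====

-- the 'while' loop of B's inner count: walks the M1-chain accumulating 'total';
-- subtree recursion (mirrored M2 child and M3 child) starts a fresh chain with total 0
def pvLoopB (lim a b c total : Int) (h : pvInv a b c) : Int :=
  if hgt : lim < a + b + c then total
  else
    pvLoopB lim (a - 2*b + 2*c) (2*a - b + 2*c) (2*a - 2*b + 3*c)
      (total + 1
        + (if a ≠ b then
            pvLoopB lim (-2*a + b + 2*c) (-a + 2*b + 2*c) (-2*a + 2*b + 3*c) 0
              (pvInv_M2s a b c h)
          else 0)
        + pvLoopB lim (2*a + b + 2*c) (a + 2*b + 2*c) (2*a + 2*b + 3*c) 0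
            (pvInv_M3 a b c h))
      (pvInv_M1 a b c h)
termination_by (lim + 1 - (a + b + c)).toNat
decreasing_by
  · exact pvToNatLt lim _ _ (pvPerim_M3 a b c h) hgt
  · exact pvToNatLt lim _ _ (pvPerim_M2s a b c h) hgt
  · exact pvToNatLt lim _ _ (pvPerim_M1 a b c h) hgt

def solve_alt (limit : Int) : Int :=
  pvLoopB limit 2 2 3 0 ⟨by norm_num, by norm_num, by norm_num, by norm_num⟩

-- ===== PRECONDITION & SPEC =====
def Spec_solve (limit : Int) (out : Int) : Prop := out = solve_alt limit
instance (limit : Int) (out : Int) : Decidable (Spec_solve limit out) := by unfold Spec_solve; infer_instance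

-- ===== CLAIM (what is proved, stated in full; the proofs are below) =====
def Claim_equal_solve : Prop := ∀ (limit : Int), Dom_solve limit → Spec_solve limit (solve limit)

-- ===== LEMMAS AND PROOFS =====

-- common yardstick: number of tree nodes at-or-below (a,b,c) with perimeter ≤ lim
def pvCnt (lim a b c : Int) : Int :=
  if h : (0 < a ∧ 0 < b ∧ a ≤ c ∧ b ≤ c) ∧ a + b + c ≤ lim then
    1 + pvCnt lim (a - 2*b + 2*c) (2*a - b + 2*c) (2*a - 2*b + 3*c)
      + (if a ≠ b then pvCnt lim (-a + 2*b + 2*c) (-2*a + b + 2*c) (-2*a + 2*b + 3*c) else 0)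
      + pvCnt lim (2*a + b + 2*c) (a + 2*b + 2*c) (2*a + 2*b + 3*c)
  else 0
termination_by (lim + 1 - (a + b + c)).toNat
decreasing_by
  · exact pvToNatLt lim _ _ (pvPerim_M1 a b c h.1) (not_lt.mpr h.2)
  · exact pvToNatLt lim _ _ (pvPerim_M2 a b c h.1) (not_lt.mpr h.2)
  · exact pvToNatLt lim _ _ (pvPerim_M3 a b c h.1) (not_lt.mpr h.2)

def pvSum (lim : Int) (l : List (Int × Int × Int)) : Int :=
  (l.map fun t => pvCnt lim t.1 t.2.1 t.2.2).sum

theorem pvCnt_zero (lim a b c : Int) (h : lim < a + b + c) : pvCnt lim a b c = 0 := by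
  rw [pvCnt.eq_def]
  exact dif_neg (by rintro ⟨-, hp⟩; omega)

theorem pvCnt_pos (lim a b c : Int) (hh : pvInv a b c) (hp : a + b + c ≤ lim) :
    pvCnt lim a b c =
      1 + pvCnt lim (a - 2*b + 2*c) (2*a - b + 2*c) (2*a - 2*b + 3*c)
        + (if a ≠ b then pvCnt lim (-a + 2*b + 2*c) (-2*a + b + 2*c) (-2*a + 2*b + 3*c) else 0)
        + pvCnt lim (2*a + b + 2*c) (a + 2*b + 2*c) (2*a + 2*b + 3*c) := by
  rw [pvCnt.eq_def]
  exact dif_pos ⟨hh, hp⟩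

theorem solveLoop_eq (lim : Int) (stack : List (Int × Int × Int)) (cnt : Int)
    (h : pvInvAll stack) : solveLoop lim stack cnt h = cnt + pvSum lim stack := by
  fun_induction solveLoop
  · simp [pvSum]
  · rename_i cnt a b c rest h2 hgt h' ih
    rw [ih]
    simp only [pvSum, List.map_cons, List.sum_cons]
    rw [pvCnt_zero lim a b c (by omega)]
    ring
  · rename_i cnt a b c rest h2 hgt h' ih
    rw [ih]
    have hinv := h2 (a, b, c) (by simp)
    simp only [pvSum, pvStepA, pvPushIf, List.map_cons, List.sum_cons]
    rw [pvCnt_pos lim a b c hinv (by omega)]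
    split_ifs <;>
      (try simp only [List.map_cons, List.sum_cons]) <;>
      (try rw [pvCnt_zero lim (a - 2*b + 2*c) (2*a - b + 2*c) (2*a - 2*b + 3*c) (by omega)]) <;>
      (try rw [pvCnt_zero lim (-a + 2*b + 2*c) (-2*a + b + 2*c) (-2*a + 2*b + 3*c) (by omega)]) <;>
      (try rw [pvCnt_zero lim (2*a + b + 2*c) (a + 2*b + 2*c) (2*a + 2*b + 3*c) (by omega)]) <;>
      omega

-- the mirror symmetry used by B: the subtree count is invariant under swapping a and b
theorem pvCnt_swap (lim a b c : Int) : pvCnt lim a b c = pvCnt lim b a c := by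
  fun_induction pvCnt lim a b c with
  | case1 a b c h ih1 ih2 ih3 =>
    obtain ⟨hh, hp⟩ := h
    rw [pvCnt_pos lim b a c ⟨hh.2.1, hh.1, hh.2.2.2, hh.2.2.1⟩ (by omega)]
    -- children of (b,a,c): M1(b,a,c) = swap(M2(a,b,c)), M2(b,a,c) = swap(M1(a,b,c)),
    -- M3(b,a,c) = swap(M3(a,b,c)); normalise the argument polynomials and use the IHs
    by_cases hab : a = b
    · subst hab
      ring_nf
    · ring_nf
      ring_nf at ih1 ih2 ih3
      rw [if_pos hab, if_pos (Ne.symm hab), ih1, ih2, ih3]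
      omega
  | case2 a b c h =>
    refine Eq.symm ?_
    rw [pvCnt.eq_def]
    refine dif_neg ?_
    rintro ⟨hh, hp⟩
    exact h ⟨⟨hh.2.1, hh.1, hh.2.2.2, hh.2.2.1⟩, by omega⟩

theorem pvLoopB_eq (lim a b c total : Int) (h : pvInv a b c) :
    pvLoopB lim a b c total h = total + pvCnt lim a b c := by
  fun_induction pvLoopB
  · rename_i a b c total h hgt
    rw [pvCnt_zero lim a b c hgt]
    ring
  · rename_i a b c total h hgt ih2 ih3 ih1
    refine ih1.trans ?_
    simp only [ih2, ih3]
    rw [pvCnt_pos lim a b c h (by omega)]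
    have hsw := pvCnt_swap lim (-2*a + b + 2*c) (-a + 2*b + 2*c) (-2*a + 2*b + 3*c)
    by_cases hab : a = b
    · rw [dif_neg (not_not_intro hab), if_neg (not_not_intro hab)]
      ring
    · rw [dif_pos hab, if_pos hab]
      omega

-- ===== VERDICT (by name: the statement is the Claim_ definition above) =====
theorem solve_spec : Claim_equal_solve := by
  unfold Claim_equal_solve Spec_solve
  intro limit _
  rw [solve, solve_alt, solveLoop_eq, pvLoopB_eq]
  simp [pvSum]
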